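-- pv_equiv track=rewrite | github.com/vi3318/Url-Agent | crawler/scope_filter.py | _scope_path_from_root
-- ===== SOURCE A (Python) =====
-- _FILE_EXTENSIONS = frozenset({
--     ".html", ".htm", ".php", ".asp", ".aspx", ".jsp",
--     ".shtml", ".xhtml", ".cfm", ".cgi", ".pl", ".py", ".rb",
-- })
--
-- def _scope_path_from_root(canon_path: str) -> str:
--     """
--     Determine the scope path from an already-canonicalised root path.
--
--     If the last segment has a known file extension (e.g. ``/docs/index.html``),
--     the *parent directory* is used as the scope (``/docs``).
--     """
--     if canon_path == "/":
--         return "/"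
--
--     last_segment = canon_path.rsplit("/", 1)[-1]
--     for ext in _FILE_EXTENSIONS:
--         if last_segment.lower().endswith(ext):
--             parent = canon_path.rsplit("/", 1)[0]
--             return parent if parent else "/"
--
--     return canon_path
-- ===== SOURCE B (Python) =====
-- _FILE_EXTENSIONS = frozenset({
--     ".html", ".htm", ".php", ".asp", ".aspx", ".jsp",
--     ".shtml", ".xhtml", ".cfm", ".cgi", ".pl", ".py", ".rb",
-- })
--
-- def _rsplit1(s, sep):
--     """Split around the LAST occurrence of sep by one backward index scan.
--     Returns (head, tail); head is None when sep does not occur."""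
--     i = len(s) - 1
--     while i >= 0:
--         if s[i] == sep:
--             return s[:i], s[i + 1:]
--         i -= 1
--     return None, s
--
-- def _scope_path_from_root(canon_path: str) -> str:
--     if canon_path == "/":
--         return "/"
--     head, seg = _rsplit1(canon_path, "/")
--     stem, ext = _rsplit1(seg.lower(), ".")
--     if stem is None or "." + ext not in _FILE_EXTENSIONS:
--         return canon_path
--     if head is None:
--         return canon_path
--     return head if head else "/"
-- ===== Notes on version B (the rewrite author's own statement) =====
-- stated objective: alternative
-- what changed: B drops A's 13-fold endswith loop: a hand-written backward-scan helper _rsplit1 splits head/segment and stem/extension around the last separator in one right-to-left pass each, and a single set-membership test on the extracted extension decides the match (exact because every known extension contains exactly one dot).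
import Mathlib
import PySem

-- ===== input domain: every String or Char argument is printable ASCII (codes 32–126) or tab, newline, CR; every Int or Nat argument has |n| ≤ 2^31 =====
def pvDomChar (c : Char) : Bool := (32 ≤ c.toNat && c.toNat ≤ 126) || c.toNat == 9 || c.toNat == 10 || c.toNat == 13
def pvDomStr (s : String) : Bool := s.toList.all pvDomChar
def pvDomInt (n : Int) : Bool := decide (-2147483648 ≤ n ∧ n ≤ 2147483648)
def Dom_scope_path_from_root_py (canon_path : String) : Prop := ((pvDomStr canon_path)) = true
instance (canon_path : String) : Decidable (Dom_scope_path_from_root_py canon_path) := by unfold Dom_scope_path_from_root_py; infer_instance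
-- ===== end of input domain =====

-- B replaces A's 13-fold endswith loop by a backward-scan split helper extracting head/segment and
-- stem/extension, plus a single set-membership test (objective: alternative).

-- _FILE_EXTENSIONS (a frozenset of lowercase extensions; A's loop result is order-independent)
def pvExts : List (List Char) :=
  [['.','h','t','m','l'], ['.','h','t','m'], ['.','p','h','p'], ['.','a','s','p'],
   ['.','a','s','p','x'], ['.','j','s','p'], ['.','s','h','t','m','l'], ['.','x','h','t','m','l'],
   ['.','c','f','m'], ['.','c','g','i'], ['.','p','l'], ['.','p','y'], ['.','r','b']]

-- ===== PORT A =====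
-- A's `s.rsplit(sep, 1)` pieces, exact:
-- last piece = chars after the last `sep` (the whole list if `sep` absent)
def pyRsplit1Last (cs : List Char) (sep : Char) : List Char :=
  (cs.reverse.takeWhile (· ≠ sep)).reverse
-- first piece = chars before the last `sep` (the whole list if `sep` absent)
def pyRsplit1Head (cs : List Char) (sep : Char) : List Char :=
  if sep ∈ cs then ((cs.reverse.dropWhile (· ≠ sep)).tail).reverse else cs

def scope_path_from_root_py (canon_path : String) : String :=
  if canon_path = "/" then "/"
  else  -- last_segment = canon_path.rsplit("/", 1)[-1]; loop over the frozenset = any-match (result is order-independent)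
    if pvExts.any (fun ext =>
        PySem.Chars.endswith (PySem.Chars.lower (pyRsplit1Last canon_path.toList '/')) ext) then
      if pyRsplit1Head canon_path.toList '/' = [] then "/"
      else String.ofList (pyRsplit1Head canon_path.toList '/')
    else canon_path

-- ===== PORT B =====
-- B's _rsplit1: one backward index scan; recursion over the REVERSED char list with the tail
-- accumulated in order (exactly the Python while-loop from i = len-1 down to 0).
def rsplitGo (sep : Char) : List Char → List Char → Option (List Char) × List Char
  | [], acc => (none, acc)
  | c :: rest, acc =>
      if c = sep then (some rest.reverse, acc)
      else rsplitGo sep rest (c :: acc)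

def rsplit1B (cs : List Char) (sep : Char) : Option (List Char) × List Char :=
  rsplitGo sep cs.reverse []

def scope_path_from_root_py_alt (canon_path : String) : String :=
  if canon_path = "/" then "/"
  else
    let hs := rsplit1B canon_path.toList '/'
    let se := rsplit1B (PySem.Chars.lower hs.2) '.'
    match se.1 with
    | none => canon_path          -- no dot: no extension
    | some _ =>
      if ('.' :: se.2) ∈ pvExts then
        match hs.1 with
        | none => canon_path      -- no '/': no parent directory
        | some h => if h = [] then "/" else String.ofList h
      else canon_path

-- ===== PRECONDITION & SPEC =====
def Spec_scope_path_from_root_py (canon_path : String) (out : String) : Prop := out = scope_path_from_root_py_alt canon_path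
instance (canon_path : String) (out : String) : Decidable (Spec_scope_path_from_root_py canon_path out) := by unfold Spec_scope_path_from_root_py; infer_instance

-- ===== CLAIM (what is proved, stated in full; the proofs are below) =====
def Claim_equal_scope_path_from_root_py : Prop := ∀ (canon_path : String), Dom_scope_path_from_root_py canon_path → Spec_scope_path_from_root_py canon_path (scope_path_from_root_py canon_path)

-- ===== LEMMAS AND PROOFS =====

-- B's backward scan computes exactly the takeWhile/dropWhile decomposition around the last separator.
lemma rsplitGo_eq (sep : Char) (r acc : List Char) :
    rsplitGo sep r acc =
      ((if sep ∈ r then some ((r.dropWhile (· ≠ sep)).tail.reverse) else none),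
       (r.takeWhile (· ≠ sep)).reverse ++ acc) := by
  induction r generalizing acc with
  | nil => simp [rsplitGo]
  | cons c rest ih =>
    by_cases hc : c = sep
    · subst hc; simp [rsplitGo]
    · simp [rsplitGo, hc, ih, Ne.symm hc]

lemma rsplit1B_eq (cs : List Char) (sep : Char) :
    rsplit1B cs sep =
      ((if sep ∈ cs then some (pyRsplit1Head cs sep) else none), pyRsplit1Last cs sep) := by
  simp only [rsplit1B, rsplitGo_eq, pyRsplit1Head, pyRsplit1Last, List.mem_reverse,
    List.append_nil]
  split_ifs with hm <;> simp

-- takeWhile past a dot-free block stops exactly at the dot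
lemma tw_append (u rest : List Char) (hu : '.' ∉ u) :
    (u ++ '.' :: rest).takeWhile (· ≠ '.') = u := by
  simp only [ne_eq, decide_not]
  induction u with
  | nil => simp
  | cons a u ih =>
    simp only [List.mem_cons, not_or] at hu
    simp [Ne.symm hu.1, ih hu.2]

-- if r contains a dot, its dot-free head followed by '.' is a prefix of r
lemma tw_prefix (r : List Char) (hm : '.' ∈ r) :
    r.takeWhile (· ≠ '.') ++ ['.'] <+: r := by
  simp only [ne_eq, decide_not]
  induction r with
  | nil => cases hm
  | cons a r ih =>
    by_cases ha : a = '.'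
    · subst ha; simp
    · rcases List.mem_cons.mp hm with h | h
      · exact absurd h.symm ha
      · rw [List.takeWhile_cons, if_pos (by simp [ha]), List.cons_append,
          List.cons_prefix_cons]
        exact ⟨rfl, ih h⟩

-- On reversed lists: `u ++ ['.']` is a prefix of r iff '.' occurs in r and the '.'-free head of r is exactly u.
lemma prefix_dot_iff (r u : List Char) (hu : '.' ∉ u) :
    u ++ ['.'] <+: r ↔ ('.' ∈ r ∧ r.takeWhile (· ≠ '.') = u) := by
  constructor
  · rintro ⟨rest, rfl⟩
    refine ⟨by simp, ?_⟩
    rw [List.append_assoc, List.singleton_append, tw_append u rest hu]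
  · rintro ⟨hmem, htw⟩
    have := tw_prefix r hmem
    rwa [htw] at this

-- Characterisation of "ends with '.'::t" for a dot-free t, via the extension extracted by rsplit('.', 1).
lemma ext_suffix_iff (low t : List Char) (ht : '.' ∉ t) :
    ('.' :: t) <:+ low ↔ ('.' ∈ low ∧ pyRsplit1Last low '.' = t) := by
  rw [← List.reverse_prefix]
  simp only [List.reverse_cons]
  rw [prefix_dot_iff low.reverse t.reverse (by simpa using ht)]
  constructor
  · rintro ⟨hm, htw⟩
    refine ⟨by simpa using hm, ?_⟩
    have := congrArg List.reverse htw
    simpa [pyRsplit1Last] using this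
  · rintro ⟨hm, hlast⟩
    refine ⟨by simpa using hm, ?_⟩
    have := congrArg List.reverse hlast
    simpa [pyRsplit1Last] using this

-- The extracted extension is dot-free.
lemma no_dot_in_last (low : List Char) : '.' ∉ pyRsplit1Last low '.' := by
  intro h
  simp only [pyRsplit1Last, List.mem_reverse] at h
  have := List.mem_takeWhile_imp h
  simp at this

-- The two guard conditions coincide.
lemma cond_iff (low : List Char) :
    (pvExts.any (fun ext => PySem.Chars.endswith low ext) = true) ↔
      ('.' ∈ low ∧ ('.' :: pyRsplit1Last low '.') ∈ pvExts) := by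
  rw [List.any_eq_true]
  constructor
  · rintro ⟨e, he, hend⟩
    have hsuf := (PySem.Chars.endswith_iff low e).mp hend
    fin_cases he <;>
      · obtain ⟨hm, hl⟩ := (ext_suffix_iff low _ (by decide)).mp hsuf
        exact ⟨hm, by rw [hl]; simp [pvExts]⟩
  · rintro ⟨hm, hmem⟩
    refine ⟨'.' :: pyRsplit1Last low '.', hmem, ?_⟩
    rw [PySem.Chars.endswith_iff]
    exact (ext_suffix_iff low _ (no_dot_in_last low)).mpr ⟨hm, rfl⟩

-- When '/' does not occur, A's parent piece is the whole list.
lemma head_no_sep (cs : List Char) (h : '/' ∉ cs) : pyRsplit1Head cs '/' = cs := by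
  simp [pyRsplit1Head, h]

-- ===== VERDICT (by name: the statement is the Claim_ definition above) =====
theorem scope_path_from_root_py_spec : Claim_equal_scope_path_from_root_py := by
  intro canon_path _
  unfold Spec_scope_path_from_root_py scope_path_from_root_py scope_path_from_root_py_alt
  by_cases hroot : canon_path = "/"
  · simp [hroot]
  · simp only [if_neg hroot, rsplit1B_eq]
    set low := PySem.Chars.lower (pyRsplit1Last canon_path.toList '/') with hlow
    have h := cond_iff low
    by_cases hA : (pvExts.any (fun ext => PySem.Chars.endswith low ext)) = true
    · obtain ⟨h1, h2⟩ := h.mp hA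
      rw [if_pos hA]
      simp only [if_pos h1, h2]
      by_cases hs : '/' ∈ canon_path.toList
      · simp [hs]
      · by_cases hnil : canon_path.toList = []
        · exfalso
          rw [hlow, hnil] at h1
          simp [pyRsplit1Last, PySem.Chars.lower] at h1
        · simp [hs, head_no_sep _ hs, hnil]
    · rw [if_neg hA]
      by_cases h1 : '.' ∈ low
      · have h2 : ('.' :: pyRsplit1Last low '.') ∉ pvExts := fun hm => hA (h.mpr ⟨h1, hm⟩)
        simp [h1, h2]
      · simp [h1]
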